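-- pv_equiv track=rewrite | github.com/Hikari-desuyoo/periodic-sequences | fraction_part.py | get_ordered_period
-- ===== SOURCE A (Python) =====
-- def get_ordered_period(sequence_list):
--     unordered_period = sequence_list[0]
--     not_period = ""
--     for sequence in sequence_list:
--         if sequence != unordered_period:
--             not_period = sequence
--             break
--
--     if not not_period: return unordered_period[::-1]
--
--     ordered_period = unordered_period
--     for i, digit in enumerate(not_period):
--         if not i<len(unordered_period):
--             break
--
--         if digit == unordered_period[i]:
--             ordered_period = ordered_period[1:] + digit
--
--     return ordered_period[::-1]
-- ===== SOURCE B (Python) =====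
-- def get_ordered_period(sequence_list):
--     unordered_period = sequence_list[0]
--     not_period = next((s for s in sequence_list if s != unordered_period), "")
--     if not not_period:
--         return unordered_period[::-1]
--     matches = [c for i, c in enumerate(not_period)
--                if i < len(unordered_period) and c == unordered_period[i]]
--     k = len(matches)
--     return (unordered_period[k:] + "".join(matches))[::-1]
-- ===== Notes on version B (the rewrite author's own statement) =====
-- stated objective: alternative
-- what changed: replaces the k repeated O(L) string rotations with a single count of matching positions followed by one slice-and-join building the final window directly
import Mathlib
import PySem

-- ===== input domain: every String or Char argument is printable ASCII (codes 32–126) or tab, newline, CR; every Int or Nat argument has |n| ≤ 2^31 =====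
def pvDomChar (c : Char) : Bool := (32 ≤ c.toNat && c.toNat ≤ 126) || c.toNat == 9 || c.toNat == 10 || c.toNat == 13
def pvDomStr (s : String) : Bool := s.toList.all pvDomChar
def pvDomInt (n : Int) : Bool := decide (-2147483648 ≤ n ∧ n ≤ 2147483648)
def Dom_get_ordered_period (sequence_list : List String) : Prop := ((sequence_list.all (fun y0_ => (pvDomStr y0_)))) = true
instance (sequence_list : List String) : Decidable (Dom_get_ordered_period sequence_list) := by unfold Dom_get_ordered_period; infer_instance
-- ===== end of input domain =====

-- B replaces A's k repeated one-step string rotations with one match-count and a single slice-and-join; same result, alternative algorithm.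


-- ===== PORT A =====
-- first loop of A: first sequence differing from unordered_period (else "")
def findNotPeriodA (up : String) : List String → String
  | [] => ""
  | s :: rest => if s ≠ up then s else findNotPeriodA up rest

-- second loop of A: `for i, digit in enumerate(not_period)` with the break and the rotation
def loopA (up : List Char) : Nat → List Char → List Char → List Char
  | _, [], op => op
  | i, d :: rest, op =>
    if ¬ i < up.length then op
    else if some d = up[i]? then loopA up (i+1) rest (op.drop 1 ++ [d])
    else loopA up (i+1) rest op

def get_ordered_period (sequence_list : List String) : String :=
  let up := sequence_list.headD ""   -- sequence_list[0]; Pre_ excludes the empty list, where Python raises IndexError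
  let np := findNotPeriodA up sequence_list
  if np = "" then String.ofList up.toList.reverse
  else String.ofList (loopA up.toList 0 np.toList up.toList).reverse

-- ===== PORT B =====
-- B's comprehension: characters of not_period matching unordered_period at the same index
def matchesB (up : List Char) : Nat → List Char → List Char
  | _, [] => []
  | i, c :: rest =>
    if i < up.length ∧ up[i]? = some c then c :: matchesB up (i+1) rest
    else matchesB up (i+1) rest

def get_ordered_period_alt (sequence_list : List String) : String :=
  let up := sequence_list.headD ""   -- sequence_list[0]; Pre_ excludes the empty list, where Python raises IndexError
  let np := ((sequence_list.find? (fun s => s ≠ up)).getD "")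
  if np = "" then String.ofList up.toList.reverse
  else
    let ms := matchesB up.toList 0 np.toList
    String.ofList ((up.toList.drop ms.length ++ ms)).reverse

-- ===== PRECONDITION & SPEC =====
-- Pre_ excludes only the empty list, on which Python A raises IndexError at sequence_list[0].
def Pre_get_ordered_period (sequence_list : List String) : Prop := sequence_list ≠ []
instance (sequence_list : List String) : Decidable (Pre_get_ordered_period sequence_list) := by unfold Pre_get_ordered_period; infer_instance
def pvWitness_get_ordered_period : List String := ["12", "21"]
def Spec_get_ordered_period (sequence_list : List String) (out : String) : Prop := out = get_ordered_period_alt sequence_list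
instance (sequence_list : List String) (out : String) : Decidable (Spec_get_ordered_period sequence_list out) := by unfold Spec_get_ordered_period; infer_instance

-- ===== CLAIM (what is proved, stated in full; the proofs are below) =====
def Claim_equal_get_ordered_period : Prop := ∀ (sequence_list : List String), Dom_get_ordered_period sequence_list → Pre_get_ordered_period sequence_list → Spec_get_ordered_period sequence_list (get_ordered_period sequence_list)

-- ===== LEMMAS AND PROOFS =====

theorem findNotPeriodA_eq_find? (up : String) (l : List String) :
    findNotPeriodA up l = ((l.find? (fun s => s ≠ up)).getD "") := by
  induction l with
  | nil => rfl
  | cons s rest ih =>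
    by_cases h : s = up
    · simp [findNotPeriodA, List.find?, h, ih]
    · simp [findNotPeriodA, List.find?, h]

theorem matchesB_cons (up : List Char) (i : Nat) (c : Char) (rest : List Char) :
    matchesB up i (c :: rest) =
      if i < up.length ∧ up[i]? = some c then c :: matchesB up (i+1) rest
      else matchesB up (i+1) rest := rfl

theorem loopA_cons (up : List Char) (i : Nat) (d : Char) (rest op : List Char) :
    loopA up i (d :: rest) op =
      if ¬ i < up.length then op
      else if some d = up[i]? then loopA up (i+1) rest (op.drop 1 ++ [d])
      else loopA up (i+1) rest op := rfl

theorem matchesB_nil_of_ge (up np : List Char) (i : Nat) (h : up.length ≤ i) :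
    matchesB up i np = [] := by
  induction np generalizing i with
  | nil => rfl
  | cons c rest ih =>
    have hc : ¬ (i < up.length ∧ up[i]? = some c) := by omega
    rw [matchesB_cons, if_neg hc]
    exact ih (i+1) (by omega)

theorem matchesB_len_le (up np : List Char) (i : Nat) (h : i ≤ up.length) :
    (matchesB up i np).length + i ≤ up.length := by
  induction np generalizing i with
  | nil => simpa [matchesB]
  | cons c rest ih =>
    by_cases hc : i < up.length ∧ up[i]? = some c
    · have := ih (i+1) (by omega)
      rw [matchesB_cons, if_pos hc, List.length_cons]
      omega
    · rw [matchesB_cons, if_neg hc]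
      by_cases hi : i + 1 ≤ up.length
      · have := ih (i+1) hi
        omega
      · rw [matchesB_nil_of_ge _ _ _ (by omega)]
        simp; omega

theorem loopA_eq (up : List Char) (np : List Char) (i : Nat) (op : List Char)
    (hop : op.length = up.length) :
    loopA up i np op = op.drop (matchesB up i np).length ++ matchesB up i np := by
  induction np generalizing i op with
  | nil => simp [loopA, matchesB]
  | cons d rest ih =>
    by_cases hi : i < up.length
    · by_cases hd : some d = up[i]?
      · have hc : i < up.length ∧ up[i]? = some d := ⟨hi, hd.symm⟩
        have hlen : (matchesB up (i+1) rest).length + (i+1) ≤ up.length :=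
          matchesB_len_le up rest (i+1) (by omega)
        have hop' : (op.drop 1 ++ [d]).length = up.length := by
          simp; omega
        have hm1 : (matchesB up (i+1) rest).length ≤ (op.drop 1).length := by
          simp; omega
        rw [loopA_cons, if_neg (not_not_intro hi), if_pos hd, matchesB_cons, if_pos hc,
          ih (i+1) _ hop', List.drop_append_of_le_length hm1, List.drop_drop,
          List.append_assoc, List.length_cons, List.singleton_append]
        have : (matchesB up (i+1) rest).length + 1 = 1 + (matchesB up (i+1) rest).length := by
          omega
        rw [this]
      · have hc : ¬ (i < up.length ∧ up[i]? = some d) := fun h => hd h.2.symm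
        rw [loopA_cons, if_neg (not_not_intro hi), if_neg hd, matchesB_cons, if_neg hc,
          ih (i+1) op hop]
    · rw [matchesB_nil_of_ge _ _ _ (by omega), loopA_cons, if_pos hi]
      simp

-- ===== VERDICT (by name: the statement is the Claim_ definition above) =====
theorem get_ordered_period_spec : Claim_equal_get_ordered_period := by
  intro l _ _
  unfold Spec_get_ordered_period get_ordered_period get_ordered_period_alt
  simp only [findNotPeriodA_eq_find?]
  set up := l.headD ""
  set np := ((l.find? (fun s => s ≠ up)).getD "")
  by_cases h : np = ""
  · simp [h]
  · simp only [h, if_neg, not_false_iff]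
    rw [loopA_eq up.toList np.toList 0 up.toList rfl]
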